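-- pv_equiv track=rewrite | github.com/ssb22/gradint | gradint-build/src/synth.py | sort_out_pinyin_3rd_tones
-- ===== SOURCE A (Python) =====
-- py_final_letters="aeginouvrAEGINOUVR:" # (don't just pick up on tone numbers, but on numbers after finals, otherwise will have trouble if there's numeric input)
--
-- def sort_out_pinyin_3rd_tones(pinyin):
--     # Tone sandhi blocking rules: Need to stop 3rd-tones sortout at end of any 2-syllable word + "gei3 ni3" + "wo3 xiang3".
--     # Also need to stop at phrase breaks and any English word (or hanzi, although may get awkward cases with 3rd-tone hanzi mixed with pinyin, but that's no big worry as lily isn't too reliable anyway and with partials it'll be transliterated)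
--     segments = [] ; thisSeg = "" ; syls = 0
--     def endsWithSpecialWordpair(segLower): return segLower.endswith("gei3 ni3") or segLower.endswith("gei3 wo3") or segLower.endswith("ni3 xiang3") or segLower.endswith("wo3 xiang3")
--     for c in pinyin:
--         if ord(c)>128 or c in ".,?;" or (c==" " and syls==2) or endsWithSpecialWordpair(thisSeg.lower()):
--             segments.append(thisSeg) ; thisSeg="" ; syls = 0
--         elif c==" ": syls = 0
--         elif c in "12345": syls += 1
--         thisSeg += c
--     segments.append(thisSeg)
--     # Now go for each segment
--     ret = []
--     for seg in segments:
--       i=0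
--       while i<len(seg):
--         while i<len(seg) and seg[i] not in '12345': i+=1
--         if i<len(seg) and seg[i]=='3' and i and seg[i-1] in py_final_letters:
--             toneToChange = i ; numThirdsAfter = 0
--             j = i
--             while True:
--                 j += 1
--                 while j<len(seg) and seg[j] not in '12345': j+=1
--                 if j<len(seg) and seg[j]=='3' and seg[j-1] in py_final_letters: numThirdsAfter+=1
--                 else: break
--             if numThirdsAfter % 2: seg=seg[:toneToChange]+'2'+seg[toneToChange+1:]
--         i += 1
--       ret.append(seg)
--     return "".join(ret)
-- ===== SOURCE B (Python) =====
-- py_final_letters="aeginouvrAEGINOUVR:" # (don't just pick up on tone numbers, but on numbers after finals, otherwise will have trouble if there's numeric input)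
--
-- def _ends(low, pat):
--     n = len(pat)
--     return len(low) >= n and low[-n:] == list(pat)
--
-- def _ends_special(low):
--     return _ends(low, "gei3 ni3") or _ends(low, "gei3 wo3") or _ends(low, "ni3 xiang3") or _ends(low, "wo3 xiang3")
--
-- def _fix_seg(seg):
--     # Right-to-left single pass: cnt = number of consecutive sandhi-eligible
--     # third tones immediately following the current position; flip to '2'
--     # exactly when cnt is odd.
--     out = []
--     cnt = 0
--     for i in range(len(seg)-1, -1, -1):
--         c = seg[i]
--         if c in "12345":
--             if c == '3' and i > 0 and seg[i-1] in py_final_letters: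
--                 if cnt % 2: c = '2'
--                 cnt += 1
--             else:
--                 cnt = 0
--         out.append(c)
--     out.reverse()
--     return out
--
-- def sort_out_pinyin_3rd_tones(pinyin):
--     # one linear segmentation pass: the segment and its lowercase copy are kept
--     # as lists so each step is O(1)
--     segments = [] ; cur = [] ; low = [] ; syls = 0
--     for c in pinyin:
--         if ord(c) > 128 or c in ".,?;" or (c == " " and syls == 2) or _ends_special(low):
--             segments.append(cur) ; cur = [] ; low = [] ; syls = 0
--         elif c == " ": syls = 0
--         elif c in "12345": syls += 1
--         cur.append(c) ; low.append(c.lower())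
--     segments.append(cur)
--     out = []
--     for seg in segments:
--         out.extend(_fix_seg(seg))
--     return "".join(out)
-- ===== Notes on version B (the rewrite author's own statement) =====
-- stated objective: faster
-- what changed: Per segment, A rescans forward from every third tone to count the following run (quadratic, with in-place edits); B makes a single right-to-left pass keeping a counter of consecutive sandhi-eligible third tones and flips a tone exactly when that counter is odd.
import Mathlib
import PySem

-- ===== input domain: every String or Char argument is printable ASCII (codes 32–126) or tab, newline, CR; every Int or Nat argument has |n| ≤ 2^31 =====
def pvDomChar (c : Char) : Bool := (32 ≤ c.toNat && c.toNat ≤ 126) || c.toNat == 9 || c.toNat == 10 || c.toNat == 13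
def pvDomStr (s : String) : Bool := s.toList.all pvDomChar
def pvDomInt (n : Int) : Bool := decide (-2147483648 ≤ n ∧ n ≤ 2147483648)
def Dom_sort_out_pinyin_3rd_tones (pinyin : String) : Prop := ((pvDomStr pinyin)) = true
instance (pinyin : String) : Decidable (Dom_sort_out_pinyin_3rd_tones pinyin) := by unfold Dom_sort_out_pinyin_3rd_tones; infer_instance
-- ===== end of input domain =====

-- B replaces A's per-third-tone forward rescans with in-place edits by a single
-- right-to-left pass per segment keeping a counter of consecutive eligible third
-- tones (objective: faster on long third-tone runs).

-- helpers shared by both ports (identical constants/membership tests in both Python files)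
def pyFinalLetters : List Char := "aeginouvrAEGINOUVR:".toList
def isTone (c : Char) : Bool := c ∈ ['1', '2', '3', '4', '5']
def isFinal (c : Char) : Bool := c ∈ pyFinalLetters

-- ===== PORT A =====
def endsSpecial (l : List Char) : Bool :=
  "gei3 ni3".toList.isSuffixOf l || "gei3 wo3".toList.isSuffixOf l ||
    "ni3 xiang3".toList.isSuffixOf l || "wo3 xiang3".toList.isSuffixOf l

def segStep (st : List (List Char) × List Char × Nat) (c : Char) :
    List (List Char) × List Char × Nat :=
  if c.toNat > 128 || c ∈ ['.', ',', '?', ';'] || (c == ' ' && st.2.2 == 2)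
      || endsSpecial (PySem.Chars.lower st.2.1) then
    (st.1 ++ [st.2.1], [c], 0)
  else if c == ' ' then (st.1, st.2.1 ++ [c], 0)
  else if isTone c then (st.1, st.2.1 ++ [c], st.2.2 + 1)
  else (st.1, st.2.1 ++ [c], st.2.2)

def segmentsOf (pinyin : String) : List (List Char) :=
  let st := pinyin.toList.foldl segStep ([], [], 0)
  st.1 ++ [st.2.1]

-- inner `while i<len(seg) and seg[i] not in '12345': i+=1`
def skipA (seg : List Char) (i : Nat) : Nat :=
  if _h : i < seg.length then
    if isTone (seg.getD i ' ') then i else skipA seg (i + 1)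
  else i
termination_by seg.length - i

theorem skipA_ge (seg : List Char) (i : Nat) : i ≤ skipA seg i := by
  unfold skipA
  split
  · split
    · exact Nat.le_refl i
    · have := skipA_ge seg (i + 1); omega
  · exact Nat.le_refl i
termination_by seg.length - i

-- the `while True` lookahead counting numThirdsAfter
def lookA (seg : List Char) (j : Nat) : Nat :=
  if h : skipA seg (j + 1) < seg.length ∧ seg.getD (skipA seg (j + 1)) ' ' = '3'
      ∧ isFinal (seg.getD (skipA seg (j + 1) - 1) ' ') = true then
    1 + lookA seg (skipA seg (j + 1))
  else 0
termination_by seg.length - j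
decreasing_by
  have := skipA_ge seg (j + 1)
  omega

-- the body of the outer loop once i has been advanced to a tone position
def mutA (seg : List Char) (i : Nat) : List Char :=
  if i < seg.length ∧ seg.getD i ' ' = '3' ∧ i ≠ 0 ∧ isFinal (seg.getD (i - 1) ' ') = true then
    if lookA seg i % 2 = 1 then seg.set i '2' else seg
  else seg

theorem mutA_length (seg : List Char) (i : Nat) : (mutA seg i).length = seg.length := by
  unfold mutA; split
  · split <;> simp
  · rfl

def outerA (seg : List Char) (i : Nat) : List Char :=
  if _h : i < seg.length then
    outerA (mutA seg (skipA seg i)) (skipA seg i + 1)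
  else seg
termination_by seg.length - i
decreasing_by
  rw [mutA_length]
  have := skipA_ge seg i
  omega

def sort_out_pinyin_3rd_tones (pinyin : String) : String :=
  String.ofList (((segmentsOf pinyin).map (fun s => outerA s 0)).flatten)

-- ===== PORT B =====
-- low[-n:] == list(pat) check of Source B
def endsP (low pat : List Char) : Bool :=
  decide (pat.length ≤ low.length) && (low.drop (low.length - pat.length) == pat)

def endsSpecialB (low : List Char) : Bool :=
  endsP low "gei3 ni3".toList || endsP low "gei3 wo3".toList ||
    endsP low "ni3 xiang3".toList || endsP low "wo3 xiang3".toList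

-- segmentation pass of Source B: the lowercase copy `low` is carried along
def segStepB (st : List (List Char) × List Char × List Char × Nat) (c : Char) :
    List (List Char) × List Char × List Char × Nat :=
  if c.toNat > 128 || c ∈ ['.', ',', '?', ';'] || (c == ' ' && st.2.2.2 == 2)
      || endsSpecialB st.2.2.1 then
    (st.1 ++ [st.2.1], [c], [PySem.Chars.lowerChar c], 0)
  else if c == ' ' then (st.1, st.2.1 ++ [c], st.2.2.1 ++ [PySem.Chars.lowerChar c], 0)
  else if isTone c then (st.1, st.2.1 ++ [c], st.2.2.1 ++ [PySem.Chars.lowerChar c], st.2.2.2 + 1)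
  else (st.1, st.2.1 ++ [c], st.2.2.1 ++ [PySem.Chars.lowerChar c], st.2.2.2)

def segmentsOfB (pinyin : String) : List (List Char) :=
  let st := pinyin.toList.foldl segStepB ([], [], [], 0)
  st.1 ++ [st.2.1]

-- single right-to-left pass (argument is the reversed segment); cnt = number of
-- consecutive sandhi-eligible third tones immediately to the right
def fixRev (cnt : Nat) : List Char → List Char
  | [] => []
  | c :: rest =>
    if isTone c then
      if c == '3' && (match rest with | p :: _ => isFinal p | [] => false) then
        (if cnt % 2 = 1 then '2' else c) :: fixRev (cnt + 1) rest
      else c :: fixRev 0 rest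
    else c :: fixRev cnt rest

def fixSeg (seg : List Char) : List Char := (fixRev 0 seg.reverse).reverse

def sort_out_pinyin_3rd_tones_alt (pinyin : String) : String :=
  String.ofList (((segmentsOfB pinyin).map fixSeg).flatten)

-- ===== PRECONDITION & SPEC =====
def Spec_sort_out_pinyin_3rd_tones (pinyin : String) (out : String) : Prop := out = sort_out_pinyin_3rd_tones_alt pinyin
instance (pinyin : String) (out : String) : Decidable (Spec_sort_out_pinyin_3rd_tones pinyin out) := by unfold Spec_sort_out_pinyin_3rd_tones; infer_instance

-- ===== CLAIM (what is proved, stated in full; the proofs are below) =====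
def Claim_equal_sort_out_pinyin_3rd_tones : Prop := ∀ (pinyin : String), Dom_sort_out_pinyin_3rd_tones pinyin → Spec_sort_out_pinyin_3rd_tones pinyin (sort_out_pinyin_3rd_tones pinyin)

-- ===== LEMMAS AND PROOFS =====

-- common forward-reading specification both per-segment passes are reduced to:
-- chainS prev cnt l = length of the run of consecutive eligible third tones at
-- the head of l's tone positions (prev = preceding char), continuing with cnt
-- past the end of l; specGo flips a third tone exactly when its chain is odd
def chainS (prev : Char) (cnt : Nat) : List Char → Nat
  | [] => cnt
  | c :: rest =>
    if isTone c then (if c = '3' ∧ isFinal prev = true then 1 + chainS c cnt rest else 0)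
    else chainS c cnt rest

def specGo (prev : Char) (cnt : Nat) : List Char → List Char
  | [] => []
  | c :: rest =>
    (if c = '3' ∧ isFinal prev = true ∧ chainS c cnt rest % 2 = 1 then '2' else c)
      :: specGo c cnt rest

def cntStep (prev c : Char) (cnt : Nat) : Nat :=
  if isTone c then (if c = '3' ∧ isFinal prev = true then cnt + 1 else 0) else cnt

def outStep (prev c : Char) (cnt : Nat) : Char :=
  if c = '3' ∧ isFinal prev = true ∧ cnt % 2 = 1 then '2' else c

theorem chainS_append (c : Char) (cnt : Nat) :
    ∀ (l : List Char) (p : Char), chainS p cnt (l ++ [c]) = chainS p (cntStep (l.getLastD p) c cnt) l := by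
  intro l
  induction l with
  | nil =>
    intro p
    simp only [List.nil_append, chainS, cntStep, List.getLastD]
    split_ifs <;> omega
  | cons d l' ih =>
    intro p
    simp only [List.cons_append, chainS, ih, List.getLastD_cons]

theorem specGo_append (c : Char) (cnt : Nat) :
    ∀ (l : List Char) (p : Char),
      specGo p cnt (l ++ [c])
        = specGo p (cntStep (l.getLastD p) c cnt) l ++ [outStep (l.getLastD p) c cnt] := by
  intro l
  induction l with
  | nil =>
    intro p
    simp only [List.nil_append, specGo, chainS, outStep, List.getLastD]
    split_ifs <;> rfl
  | cons d l' ih =>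
    intro p
    simp only [List.cons_append, specGo, chainS_append, ih, List.getLastD_cons]

theorem fixRev_reverse : ∀ (l : List Char) (cnt : Nat), fixRev cnt l.reverse = (specGo ' ' cnt l).reverse := by
  intro l
  induction l using List.reverseRecOn with
  | nil => intro cnt; rfl
  | append_singleton l' c ih =>
    intro cnt
    rw [specGo_append, List.reverse_append, List.reverse_append]
    simp only [List.reverse_singleton, List.singleton_append]
    rw [← ih]
    cases hrev : l'.reverse with
    | nil =>
      have hl' : l' = [] := by simpa using congrArg List.reverse hrev
      subst hl'
      simp only [List.getLastD]
      have hf : isFinal ' ' = false := by decide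
      simp [fixRev, outStep, hf]
    | cons p t =>
      have hq : l'.getLastD ' ' = p := by
        have h2 : l' = t.reverse ++ [p] := by
          rw [← List.reverse_reverse l', hrev]; simp
        rw [h2, List.getLastD_concat]
      simp only [hq]
      by_cases ht : isTone c
      · by_cases h3 : c = '3' ∧ isFinal p = true
        · obtain ⟨hc3, hfp⟩ := h3
          subst hc3
          have h9 : isTone '3' = true := by decide
          simp [fixRev, h9, hfp, outStep, cntStep]
        · have hg : (c == '3' && isFinal p) = false := by
            by_cases h : c = '3'
            · have hfp : isFinal p = false := by
                cases hfp : isFinal p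
                · rfl
                · exact absurd ⟨h, hfp⟩ h3
              simp [h, hfp]
            · simp [h]
          have h3' : ¬(c = '3' ∧ isFinal p = true ∧ cnt % 2 = 1) := fun h => h3 ⟨h.1, h.2.1⟩
          simp [fixRev, ht, hg, outStep, cntStep, if_neg h3, if_neg h3']
      · have h3 : ¬ (c = '3') := by
          intro hc; subst hc; exact ht (by decide)
        simp [fixRev, ht, outStep, cntStep, h3]

theorem fixSeg_eq (seg : List Char) : fixSeg seg = specGo ' ' 0 seg := by
  rw [fixSeg, fixRev_reverse, List.reverse_reverse]


def prevAt (seg : List Char) (i : Nat) : Char := if i = 0 then ' ' else seg.getD (i - 1) ' '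

theorem skipA_stop_ge (seg : List Char) (i : Nat) (h1 : ¬ i < seg.length) : skipA seg i = i := by
  rw [skipA]; simp [h1]

theorem skipA_stop_lt (seg : List Char) (i : Nat) (h1 : i < seg.length)
    (h2 : isTone (seg.getD i ' ') = true) : skipA seg i = i := by
  have h2' : isTone seg[i] = true := by rwa [List.getD_eq_getElem seg ' ' h1] at h2
  rw [skipA]; simp [h1, h2']

theorem skipA_step (seg : List Char) (i : Nat) (h1 : i < seg.length)
    (h2 : isTone (seg.getD i ' ') = false) : skipA seg i = skipA seg (i + 1) := by
  have h2' : isTone seg[i] = false := by rwa [List.getD_eq_getElem seg ' ' h1] at h2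
  rw [skipA]; simp [h1, h2']

theorem skipA_le (seg : List Char) (i : Nat) (h : i ≤ seg.length) : skipA seg i ≤ seg.length := by
  by_cases h1 : i < seg.length
  · by_cases h2 : isTone (seg.getD i ' ') = true
    · rw [skipA_stop_lt seg i h1 h2]; omega
    · rw [skipA_step seg i h1 (by simpa using h2)]
      exact skipA_le seg (i + 1) (by omega)
  · rw [skipA_stop_ge seg i h1]; exact h
termination_by seg.length - i
decreasing_by omega

theorem skipA_tone (seg : List Char) (i : Nat) (h : skipA seg i < seg.length) :
    isTone (seg.getD (skipA seg i) ' ') = true := by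
  by_cases h1 : i < seg.length
  · by_cases h2 : isTone (seg.getD i ' ') = true
    · rw [skipA_stop_lt seg i h1 h2]; exact h2
    · rw [skipA_step seg i h1 (by simpa using h2)] at h ⊢
      exact skipA_tone seg (i + 1) h
  · rw [skipA_stop_ge seg i h1] at h; omega
termination_by seg.length - i
decreasing_by omega

theorem not_three_of_not_tone {c : Char} (h : isTone c = false) : ¬ (c = '3') := by
  intro hc; subst hc; simp [isTone] at h

theorem specGo_skip (seg : List Char) (i : Nat) :
    seg.take (skipA seg i) ++ specGo (prevAt seg (skipA seg i)) 0 (seg.drop (skipA seg i))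
      = seg.take i ++ specGo (prevAt seg i) 0 (seg.drop i) := by
  by_cases h1 : i < seg.length
  · by_cases h2 : isTone (seg.getD i ' ') = true
    · rw [skipA_stop_lt seg i h1 h2]
    · rw [skipA_step seg i h1 (by simpa using h2)]
      rw [specGo_skip seg (i + 1)]
      have hc : seg.getD i ' ' = seg[i] := List.getD_eq_getElem seg ' ' h1
      have h2' : isTone seg[i] = false := by rw [← hc]; simpa using h2
      have h3 : ¬ (seg[i] = '3') := not_three_of_not_tone h2'
      have hp : prevAt seg (i + 1) = seg[i] := by
        unfold prevAt
        rw [if_neg (by omega), Nat.add_sub_cancel, List.getD_eq_getElem seg ' ' h1]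
      rw [List.drop_eq_getElem_cons h1, hp]
      simp only [specGo]
      rw [if_neg (fun h => h3 h.1)]
      rw [List.take_succ_eq_append_getElem h1, List.append_assoc, List.singleton_append]
  · rw [skipA_stop_ge seg i h1]
termination_by seg.length - i
decreasing_by omega

theorem chainS_skip (seg : List Char) (k : Nat) (hk : 1 ≤ k) :
    chainS (seg.getD (skipA seg k - 1) ' ') 0 (seg.drop (skipA seg k))
      = chainS (seg.getD (k - 1) ' ') 0 (seg.drop k) := by
  by_cases h1 : k < seg.length
  · by_cases h2 : isTone (seg.getD k ' ') = true
    · rw [skipA_stop_lt seg k h1 h2]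
    · rw [skipA_step seg k h1 (by simpa using h2)]
      rw [chainS_skip seg (k + 1) (by omega)]
      have hc : seg.getD k ' ' = seg[k] := List.getD_eq_getElem seg ' ' h1
      have h2' : isTone seg[k] = false := by
        rw [← hc]; simpa using h2
      rw [List.drop_eq_getElem_cons h1, Nat.add_sub_cancel, hc]
      simp [chainS, h2']
  · rw [skipA_stop_ge seg k h1]
termination_by seg.length - k
decreasing_by omega

theorem lookA_eq (seg : List Char) (j : Nat) :
    lookA seg j = chainS (seg.getD j ' ') 0 (seg.drop (j + 1)) := by
  have hge := skipA_ge seg (j + 1)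
  have hcs := chainS_skip seg (j + 1) (by omega)
  simp only [Nat.add_sub_cancel] at hcs
  by_cases hg : skipA seg (j + 1) < seg.length ∧ seg.getD (skipA seg (j + 1)) ' ' = '3'
      ∧ isFinal (seg.getD (skipA seg (j + 1) - 1) ' ') = true
  · rw [lookA, dif_pos hg, lookA_eq seg (skipA seg (j + 1))]
    rw [← hcs]
    obtain ⟨hl, h3, hf⟩ := hg
    have hc : seg.getD (skipA seg (j + 1)) ' ' = seg[skipA seg (j + 1)] :=
      List.getD_eq_getElem seg ' ' hl
    rw [List.drop_eq_getElem_cons hl]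
    rw [← hc, h3]
    have hf' : isFinal (seg[skipA seg (j + 1) - 1]?.getD ' ') = true := hf
    simp [chainS, hf', show isTone '3' = true from by decide]
  · rw [lookA, dif_neg hg, ← hcs]
    by_cases hl : skipA seg (j + 1) < seg.length
    · have htone := skipA_tone seg (j + 1) hl
      have hc : seg.getD (skipA seg (j + 1)) ' ' = seg[skipA seg (j + 1)] :=
        List.getD_eq_getElem seg ' ' hl
      have hc2 : ¬(seg.getD (skipA seg (j + 1)) ' ' = '3'
          ∧ isFinal (seg.getD (skipA seg (j + 1) - 1) ' ') = true) :=
        fun hh => hg ⟨hl, hh.1, hh.2⟩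
      rw [List.drop_eq_getElem_cons hl, ← hc]
      simp only [chainS]
      rw [if_pos htone, if_neg hc2]
    · rw [List.drop_eq_nil_of_le (by omega)]
      rfl
termination_by seg.length - j
decreasing_by omega

theorem specGo_final_congr {p q : Char} (h : isFinal p = isFinal q) (cnt : Nat) (l : List Char) :
    specGo p cnt l = specGo q cnt l := by
  cases l <;> simp [specGo, h]

theorem outerA_stop (seg : List Char) (i : Nat) (h1 : ¬ i < seg.length) : outerA seg i = seg := by
  rw [outerA]; simp [h1]

theorem outerA_step (seg : List Char) (i : Nat) (h1 : i < seg.length) :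
    outerA seg i = outerA (mutA seg (skipA seg i)) (skipA seg i + 1) := by
  rw [outerA]; simp [h1]

theorem outer_eq (seg : List Char) (i : Nat) :
    outerA seg i = seg.take i ++ specGo (prevAt seg i) 0 (seg.drop i) := by
  by_cases h1 : i < seg.length
  · rw [outerA_step seg i h1]
    rw [outer_eq (mutA seg (skipA seg i)) (skipA seg i + 1)]
    rw [← specGo_skip seg i]
    have hge := skipA_ge seg i
    by_cases h2 : skipA seg i < seg.length
    · have htone := skipA_tone seg i h2
      have hc : seg.getD (skipA seg i) ' ' = seg[skipA seg i] := List.getD_eq_getElem seg ' ' h2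
      have hchain := lookA_eq seg (skipA seg i)
      by_cases hm : seg.getD (skipA seg i) ' ' = '3' ∧ skipA seg i ≠ 0
          ∧ isFinal (seg.getD (skipA seg i - 1) ' ') = true
      · have hfinp : isFinal (prevAt seg (skipA seg i)) = true := by
          simp only [prevAt, if_neg hm.2.1]
          exact hm.2.2
        by_cases ho : lookA seg (skipA seg i) % 2 = 1
        · -- mutation case
          have hmut : mutA seg (skipA seg i) = seg.set (skipA seg i) '2' := by
            unfold mutA; rw [if_pos ⟨h2, hm⟩, if_pos ho]
          rw [hmut]
          have hlen_take : (seg.take (skipA seg i)).length = skipA seg i := by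
            simp [List.length_take]; omega
          have hset := List.set_eq_take_cons_drop '2' h2
          have hj1 : skipA seg i + 1 = (seg.take (skipA seg i)).length + 1 := by rw [hlen_take]
          have ht1 : (seg.set (skipA seg i) '2').take (skipA seg i + 1)
              = seg.take (skipA seg i) ++ ['2'] := by
            rw [hset, hj1, List.take_length_add_append]
            rfl
          have ht2 : (seg.set (skipA seg i) '2').drop (skipA seg i + 1)
              = seg.drop (skipA seg i + 1) := by
            rw [hset, hj1, List.drop_length_add_append]
            rfl
          have hp2 : prevAt (seg.set (skipA seg i) '2') (skipA seg i + 1) = '2' := by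
            simp only [prevAt, if_neg (Nat.succ_ne_zero _), Nat.add_sub_cancel]
            rw [List.getD_eq_getElem _ ' ' (by simpa using h2)]
            exact List.getElem_set_self _
          rw [ht1, ht2, hp2, List.drop_eq_getElem_cons h2]
          have hc3 : seg[skipA seg i] = '3' := by rw [← hc]; exact hm.1
          have hcond : seg[skipA seg i] = '3' ∧ isFinal (prevAt seg (skipA seg i)) = true
              ∧ chainS seg[skipA seg i] 0 (seg.drop (skipA seg i + 1)) % 2 = 1 :=
            ⟨hc3, hfinp, by rw [← hc, ← hchain]; exact ho⟩
          simp only [specGo]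
          rw [if_pos hcond]
          rw [specGo_final_congr (show isFinal '2' = isFinal seg[skipA seg i] from by rw [hc3]; decide) 0]
          rw [List.append_assoc, List.singleton_append]
        · have hmut : mutA seg (skipA seg i) = seg := by
            unfold mutA; rw [if_pos ⟨h2, hm⟩, if_neg ho]
          rw [hmut]
          have hcond_neg : ¬(seg[skipA seg i] = '3' ∧ isFinal (prevAt seg (skipA seg i)) = true
              ∧ chainS seg[skipA seg i] 0 (seg.drop (skipA seg i + 1)) % 2 = 1) := by
            rintro ⟨-, -, hh3⟩
            exact ho (by rw [hchain, hc]; exact hh3)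
          have hp1 : prevAt seg (skipA seg i + 1) = seg[skipA seg i] := by
            simp only [prevAt, if_neg (Nat.succ_ne_zero _), Nat.add_sub_cancel]
            exact hc
          rw [List.drop_eq_getElem_cons h2]
          simp only [specGo]
          rw [if_neg hcond_neg, hp1, List.take_succ_eq_append_getElem h2,
            List.append_assoc, List.singleton_append]
      · have hmut : mutA seg (skipA seg i) = seg := by
          unfold mutA
          rw [if_neg]
          intro hcon
          exact hm ⟨hcon.2.1, hcon.2.2⟩
        rw [hmut]
        have hcond_neg : ¬(seg[skipA seg i] = '3' ∧ isFinal (prevAt seg (skipA seg i)) = true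
            ∧ chainS seg[skipA seg i] 0 (seg.drop (skipA seg i + 1)) % 2 = 1) := by
          rintro ⟨hh1, hh2, -⟩
          have hne : skipA seg i ≠ 0 := by
            intro h0
            rw [show prevAt seg (skipA seg i) = ' ' from by simp [prevAt, h0]] at hh2
            exact absurd hh2 (by decide)
          have hfin : isFinal (seg.getD (skipA seg i - 1) ' ') = true := by
            rwa [show prevAt seg (skipA seg i) = seg.getD (skipA seg i - 1) ' ' from by
              simp [prevAt, hne]] at hh2
          exact hm ⟨by rw [hc]; exact hh1, hne, hfin⟩
        have hp1 : prevAt seg (skipA seg i + 1) = seg[skipA seg i] := by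
          simp only [prevAt, if_neg (Nat.succ_ne_zero _), Nat.add_sub_cancel]
          exact hc
        rw [List.drop_eq_getElem_cons h2]
        simp only [specGo]
        rw [if_neg hcond_neg, hp1, List.take_succ_eq_append_getElem h2,
          List.append_assoc, List.singleton_append]
    · have hmut : mutA seg (skipA seg i) = seg := by
        unfold mutA
        rw [if_neg]
        intro hcon
        exact h2 hcon.1
      rw [hmut]
      have hlen : seg.length ≤ skipA seg i := by omega
      rw [List.take_of_length_le hlen, List.take_of_length_le (by omega),
        List.drop_eq_nil_of_le hlen, List.drop_eq_nil_of_le (by omega)]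
      simp [specGo]
  · rw [outerA_stop seg i h1]
    rw [List.take_of_length_le (by omega), List.drop_eq_nil_of_le (by omega)]
    simp [specGo]
termination_by seg.length - i
decreasing_by
  rw [mutA_length]
  have := skipA_ge seg i
  omega

theorem per_seg_eq (seg : List Char) : outerA seg 0 = fixSeg seg := by
  rw [outer_eq seg 0, fixSeg_eq]
  simp [prevAt]

theorem endsP_eq (l p : List Char) : endsP l p = p.isSuffixOf l := by
  rw [Bool.eq_iff_iff]
  simp only [endsP, Bool.and_eq_true, decide_eq_true_eq, beq_iff_eq, List.isSuffixOf_iff_suffix]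
  constructor
  · rintro ⟨h1, h2⟩
    exact h2 ▸ List.drop_suffix _ _
  · intro h
    refine ⟨h.length_le, ?_⟩
    obtain ⟨t, rfl⟩ := h
    simp

theorem endsSpecialB_eq (l : List Char) : endsSpecialB l = endsSpecial l := by
  simp [endsSpecialB, endsSpecial, endsP_eq]

theorem segStepB_eq (segs : List (List Char)) (cur : List Char) (syls : Nat) (c : Char) :
    segStepB (segs, cur, PySem.Chars.lower cur, syls) c
      = ((segStep (segs, cur, syls) c).1, (segStep (segs, cur, syls) c).2.1,
          PySem.Chars.lower (segStep (segs, cur, syls) c).2.1, (segStep (segs, cur, syls) c).2.2) := by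
  simp only [segStepB, segStep, endsSpecialB_eq]
  split_ifs <;> simp [PySem.Chars.lower]

theorem segFold_eq (cs : List Char) :
    ∀ (segs : List (List Char)) (cur : List Char) (syls : Nat),
      cs.foldl segStepB (segs, cur, PySem.Chars.lower cur, syls)
        = ((cs.foldl segStep (segs, cur, syls)).1, (cs.foldl segStep (segs, cur, syls)).2.1,
            PySem.Chars.lower (cs.foldl segStep (segs, cur, syls)).2.1,
            (cs.foldl segStep (segs, cur, syls)).2.2) := by
  induction cs with
  | nil => intro segs cur syls; rfl
  | cons c cs ih =>
    intro segs cur syls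
    simp only [List.foldl_cons, segStepB_eq]
    exact ih _ _ _

theorem segmentsOfB_eq (pinyin : String) : segmentsOfB pinyin = segmentsOf pinyin := by
  unfold segmentsOfB segmentsOf
  have h := segFold_eq pinyin.toList [] [] 0
  rw [show PySem.Chars.lower [] = ([] : List Char) from rfl] at h
  rw [h]

theorem ports_eq (pinyin : String) :
    sort_out_pinyin_3rd_tones pinyin = sort_out_pinyin_3rd_tones_alt pinyin := by
  unfold sort_out_pinyin_3rd_tones sort_out_pinyin_3rd_tones_alt
  rw [segmentsOfB_eq]
  have : (fun s => outerA s 0) = fixSeg := funext per_seg_eq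
  rw [this]

-- ===== VERDICT (by name: the statement is the Claim_ definition above) =====
theorem sort_out_pinyin_3rd_tones_spec : Claim_equal_sort_out_pinyin_3rd_tones := by
  intro pinyin _
  unfold Spec_sort_out_pinyin_3rd_tones
  exact ports_eq pinyin
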